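-- pv_equiv track=rewrite | github.com/capoony/In3RPayne_PopGenomics | scripts/v3/merge_Kallisto.py | parse_gtf
-- ===== SOURCE A (Python) =====
-- def parse_gtf(x):
--     '''parse a gtf 9th column'''
--     items = x.replace("\"", "").split("; ")
--     FBgn, ID = "NA", "NA"
--     for pair in items:
--         ident, symbol = pair.lstrip().split(" ")
--         if ident == "gene_id":
--             FBgn = symbol
--         elif ident == "gene_symbol":
--             ID = symbol[:-1]
--     return ID, FBgn
-- ===== SOURCE B (Python) =====
-- def _last_value(pairs, key):
--     """value of the last pair named key, searched back-to-front; None if absent"""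
--     for pair in reversed(pairs):
--         k, v = pair
--         if k == key:
--             return v
--     return None
--
-- def parse_gtf(x):
--     '''parse a gtf 9th column'''
--     pairs = [p.lstrip().split(" ") for p in x.replace("\"", "").split("; ")]
--     sym = _last_value(pairs, "gene_symbol")
--     fbgn = _last_value(pairs, "gene_id")
--     return (sym[:-1] if sym is not None else "NA",
--             fbgn if fbgn is not None else "NA")
-- ===== Notes on version B (the rewrite author's own statement) =====
-- stated objective: alternative
-- what changed: B materialises the split pairs once, then answers each key by an independent early-exit back-to-front search for its last occurrence, instead of A's single forward loop threading (FBgn, ID) state through if/elif branches.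
import Mathlib
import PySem

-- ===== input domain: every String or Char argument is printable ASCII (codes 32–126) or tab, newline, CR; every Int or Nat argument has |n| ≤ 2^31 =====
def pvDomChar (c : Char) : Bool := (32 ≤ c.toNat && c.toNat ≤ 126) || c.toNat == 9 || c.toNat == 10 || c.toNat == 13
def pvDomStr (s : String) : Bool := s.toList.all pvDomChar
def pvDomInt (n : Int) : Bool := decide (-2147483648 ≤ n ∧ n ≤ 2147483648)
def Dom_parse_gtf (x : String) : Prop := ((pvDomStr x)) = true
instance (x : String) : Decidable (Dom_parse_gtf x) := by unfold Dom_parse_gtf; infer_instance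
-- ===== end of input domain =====

-- B materialises the split pairs once and answers each key by an independent
-- back-to-front search for its last occurrence ('alternative' decomposition);
-- equal to A on all inputs where A returns.


-- ===== PORT A =====
-- s.split(sep) for nonempty literal sep (split? returns some for sep ≠ "")
def pySplit (s sep : String) : List String := (PySem.Str.split? s sep).getD []

-- A's loop: state (FBgn, ID), if/elif on the first token of each pair.
-- The non-two-token case is a Python ValueError, excluded by Pre_ (state left unchanged here).
def parseGtfStepA (st : String × String) (p : String) : String × String :=
  match pySplit (PySem.Str.lstrip p) " " with
  | [ident, symbol] =>
    if ident = "gene_id" then (symbol, st.2)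
    else if ident = "gene_symbol" then (st.1, PySem.Str.slice symbol none (some (-1)))
    else st
  | _ => st

def parse_gtf (x : String) : String × String :=
  let items := pySplit (PySem.Str.replace x "\"" "") "; "
  let st := items.foldl parseGtfStepA ("NA", "NA")
  (st.2, st.1)

-- ===== PORT B =====
-- p.lstrip().split(" ") from B's list comprehension
def parsePairB (p : String) : List String := pySplit (PySem.Str.lstrip p) " "

-- B's _last_value: early-exit scan over reversed(pairs). On a non-two-token pair
-- Python raises ValueError (excluded by Pre_); the port returns none there.
def lastValue : List (List String) → String → Option String
  | [], _ => none
  | pp :: rest, key =>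
    match pp with
    | [k, v] => if k = key then some v else lastValue rest key
    | _ => none

def parse_gtf_alt (x : String) : String × String :=
  let pairs := (pySplit (PySem.Str.replace x "\"" "") "; ").map parsePairB
  let sym := lastValue pairs.reverse "gene_symbol"
  let fbgn := lastValue pairs.reverse "gene_id"
  ((match sym with
    | some v => PySem.Str.slice v none (some (-1))
    | none => "NA"),
   (match fbgn with
    | some v => v
    | none => "NA"))

-- ===== PRECONDITION & SPEC =====
-- Pre_ excludes exactly the inputs where A (and B) raise ValueError: some '; '-split
-- item does not split on a single space into exactly two tokens.
def Pre_parse_gtf (x : String) : Prop :=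
  ∀ p ∈ pySplit (PySem.Str.replace x "\"" "") "; ",
    (pySplit (PySem.Str.lstrip p) " ").length = 2
instance (x : String) : Decidable (Pre_parse_gtf x) := by unfold Pre_parse_gtf; infer_instance
def pvWitness_parse_gtf : String := "gene_id \"FBgn0001\"; gene_symbol \"abc\";"
def Spec_parse_gtf (x : String) (out : String × String) : Prop := out = parse_gtf_alt x
instance (x : String) (out : String × String) : Decidable (Spec_parse_gtf x out) := by unfold Spec_parse_gtf; infer_instance

-- ===== CLAIM (what is proved, stated in full; the proofs are below) =====
def Claim_equal_parse_gtf : Prop := ∀ (x : String), Dom_parse_gtf x → Pre_parse_gtf x → Spec_parse_gtf x (parse_gtf x)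

-- ===== LEMMAS AND PROOFS =====
lemma lastValue_append (l1 l2 : List (List String)) (k : String)
    (h : ∀ pp ∈ l1, pp.length = 2) :
    lastValue (l1 ++ l2) k =
      (match lastValue l1 k with
       | some v => some v
       | none => lastValue l2 k) := by
  induction l1 with
  | nil => simp [lastValue]
  | cons pp rest ih =>
    have hp2 := h pp (by simp)
    rcases hp : pp with _ | ⟨a, _ | ⟨b, _ | _⟩⟩ <;> simp [hp] at hp2
    simp only [List.cons_append, lastValue]
    by_cases hk : a = k
    · simp [hk]
    · simp [hk]
      exact ih (fun q hq => h q (by simp [hq]))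

lemma fold_eq (items : List String) (st : String × String)
    (h : ∀ p ∈ items, (parsePairB p).length = 2) :
    items.foldl parseGtfStepA st =
      ((match lastValue (items.map parsePairB).reverse "gene_id" with
        | some v => v
        | none => st.1),
       (match lastValue (items.map parsePairB).reverse "gene_symbol" with
        | some v => PySem.Str.slice v none (some (-1))
        | none => st.2)) := by
  induction items generalizing st with
  | nil => simp [lastValue]
  | cons p rest ih =>
    have hp := h p (by simp)
    rcases hs : parsePairB p with _ | ⟨k, _ | ⟨v, _ | _⟩⟩ <;> simp [hs] at hp
    have hlen : ∀ pp ∈ (rest.map parsePairB).reverse, pp.length = 2 := by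
      intro pp hpp
      simp only [List.mem_reverse, List.mem_map] at hpp
      obtain ⟨q, hq, rfl⟩ := hpp
      exact h q (by simp [hq])
    simp only [List.foldl_cons, List.map_cons, List.reverse_cons]
    rw [ih _ (fun q hq => h q (by simp [hq])),
        lastValue_append _ _ _ hlen, lastValue_append _ _ _ hlen]
    have hstep : parseGtfStepA st p =
        (if k = "gene_id" then (v, st.2)
         else if k = "gene_symbol" then (st.1, PySem.Str.slice v none (some (-1)))
         else st) := by
      unfold parseGtfStepA parsePairB at *
      rw [hs]
    rw [hstep]
    by_cases h1 : k = "gene_id"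
    · subst h1
      cases lastValue (rest.map parsePairB).reverse "gene_id" <;>
        cases lastValue (rest.map parsePairB).reverse "gene_symbol" <;>
          simp [lastValue, hs]
    · by_cases h2 : k = "gene_symbol"
      · subst h2
        cases lastValue (rest.map parsePairB).reverse "gene_id" <;>
          cases lastValue (rest.map parsePairB).reverse "gene_symbol" <;>
            simp [lastValue, hs, h1]
      · cases lastValue (rest.map parsePairB).reverse "gene_id" <;>
          cases lastValue (rest.map parsePairB).reverse "gene_symbol" <;>
            simp [lastValue, hs, h1, h2]

-- ===== VERDICT (by name: the statement is the Claim_ definition above) =====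
theorem parse_gtf_spec : Claim_equal_parse_gtf := by
  intro x _ hpre
  simp only [Spec_parse_gtf, parse_gtf, parse_gtf_alt]
  rw [fold_eq _ _ hpre]
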